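-- pv_equiv track=rewrite | github.com/PurposeKnight/ai-fashion-platform | app/orchestration/pipeline.py | _pick_recipient_items
-- ===== SOURCE A (Python) =====
-- from typing import Any
--
-- def _pick_recipient_items(
--     inventory: list[dict[str, Any]],
--     pincode: str | None = None,
--     sku_id: str | None = None,
-- ) -> list[dict[str, Any]]:
--     rows = inventory
--     if pincode:
--         rows = [r for r in rows if r.get("pincode") == pincode]
--     if sku_id:
--         rows = [r for r in rows if r.get("sku_id") == sku_id]
--     return rows
-- ===== SOURCE B (Python) =====
-- def _pick_recipient_items(inventory, pincode=None, sku_id=None):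
--     # data-driven: collect the active (key, value) constraints once, then one
--     # explicit loop appends each row that satisfies every constraint
--     constraints = [(k, v) for k, v in (("pincode", pincode), ("sku_id", sku_id)) if v]
--     out = []
--     for r in inventory:
--         if all(r.get(k) == v for k, v in constraints):
--             out.append(r)
--     return out
-- ===== Notes on version B (the rewrite author's own statement) =====
-- stated objective: alternative
-- what changed: Replaces the hard-coded chain of per-field filter comprehensions with a data-driven matcher: a table of active (key, value) constraints is built once and a single explicit accumulator loop keeps rows satisfying all table entries (return-value equality; A may return the input list object itself when both filters are falsy).
import Mathlib
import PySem

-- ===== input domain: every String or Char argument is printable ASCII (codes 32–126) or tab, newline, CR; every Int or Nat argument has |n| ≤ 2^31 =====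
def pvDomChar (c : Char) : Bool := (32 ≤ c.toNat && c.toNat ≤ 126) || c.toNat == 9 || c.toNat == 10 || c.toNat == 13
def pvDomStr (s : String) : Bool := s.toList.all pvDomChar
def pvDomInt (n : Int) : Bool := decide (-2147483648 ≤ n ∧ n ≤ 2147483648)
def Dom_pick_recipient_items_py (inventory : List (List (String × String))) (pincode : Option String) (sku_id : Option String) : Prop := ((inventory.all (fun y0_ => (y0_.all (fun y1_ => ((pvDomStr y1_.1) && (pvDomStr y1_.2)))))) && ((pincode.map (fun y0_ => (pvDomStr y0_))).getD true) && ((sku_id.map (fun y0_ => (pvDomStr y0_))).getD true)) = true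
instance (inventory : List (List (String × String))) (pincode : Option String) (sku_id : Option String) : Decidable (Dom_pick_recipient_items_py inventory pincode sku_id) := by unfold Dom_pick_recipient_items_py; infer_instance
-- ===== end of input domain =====

-- B: a data-driven matcher — a table of active (key, value) constraints built once, then one explicit accumulator loop — instead of two hard-coded chained filter scans (return-value equality; A returns the input list object itself when both filters are falsy).


-- ===== PORT A =====
-- Python truthiness of an optional string argument: not None and not ""
def pvTruthy (o : Option String) : Bool := o.any (fun s => s ≠ "")

def pick_recipient_items_py (inventory : List (List (String × String))) (pincode : Option String) (sku_id : Option String) : List (List (String × String)) :=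
  let rows := inventory
  let rows := if pvTruthy pincode then
      rows.filter (fun r => (PySem.Dict.mk r).get? "pincode" == pincode) else rows
  let rows := if pvTruthy sku_id then
      rows.filter (fun r => (PySem.Dict.mk r).get? "sku_id" == sku_id) else rows
  rows

-- ===== PORT B =====
def pick_recipient_items_py_alt (inventory : List (List (String × String))) (pincode : Option String) (sku_id : Option String) : List (List (String × String)) :=
  let constraints : List (String × Option String) :=
    ([("pincode", pincode), ("sku_id", sku_id)]).filter (fun kv => pvTruthy kv.2)
  inventory.foldl (fun out r =>
    if constraints.all (fun kv => (PySem.Dict.mk r).get? kv.1 == kv.2) then out ++ [r]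
    else out) []

-- ===== PRECONDITION & SPEC =====
def Spec_pick_recipient_items_py (inventory : List (List (String × String))) (pincode : Option String) (sku_id : Option String) (out : List (List (String × String))) : Prop := out = pick_recipient_items_py_alt inventory pincode sku_id
instance (inventory : List (List (String × String))) (pincode : Option String) (sku_id : Option String) (out : List (List (String × String))) : Decidable (Spec_pick_recipient_items_py inventory pincode sku_id out) := by unfold Spec_pick_recipient_items_py; infer_instance

-- ===== CLAIM (what is proved, stated in full; the proofs are below) =====
def Claim_equal_pick_recipient_items_py : Prop := ∀ (inventory : List (List (String × String))) (pincode : Option String) (sku_id : Option String), Dom_pick_recipient_items_py inventory pincode sku_id → Spec_pick_recipient_items_py inventory pincode sku_id (pick_recipient_items_py inventory pincode sku_id)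

-- ===== LEMMAS AND PROOFS =====

theorem pv_flatten_map_singleton {α : Type} (l : List α) : (l.map fun x => [x]).flatten = l := by
  induction l with
  | nil => rfl
  | cons a t ih => simp [ih]

-- ===== VERDICT (by name: the statement is the Claim_ definition above) =====
theorem pick_recipient_items_py_spec : Claim_equal_pick_recipient_items_py := by
  intro inventory pincode sku_id _
  unfold Spec_pick_recipient_items_py pick_recipient_items_py pick_recipient_items_py_alt
  cases hp : pvTruthy pincode <;> cases hs : pvTruthy sku_id <;>
    simp [hp, hs, PySem.List.foldl_append_ite_eq_filter, List.filter_filter, Bool.and_comm, beq_eq_decide, pv_flatten_map_singleton]
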